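-- pv_equiv track=rewrite | github.com/icewall905/TuneForge | app/routes.py | is_unwanted_version
-- ===== SOURCE A (Python) =====
-- def is_unwanted_version(title, album=None):
--     """Return True if the track looks like a live/remaster/demo/acoustic/etc. version we should avoid."""
--     def has_any_keyword(text):
--         if not text:
--             return False
--         t = text.lower()
--         keywords = [
--             ' live ', ' live-', ' live_', '(live', '[live',
--             ' remaster', '(remaster', '[remaster', ' remastered',
--             ' acoustic', '(acoustic', '[acoustic',
--             ' demo', '(demo', '[demo',
--             ' edit', '(edit', '[edit',
--             ' karaoke', ' instrumental'
--         ]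
--         # Add boundary spaces to catch plain suffix/prefix
--         t_spaced = f" {t} "
--         return any(k in t_spaced for k in keywords)
--
--     return has_any_keyword(title) or has_any_keyword(album)
-- ===== SOURCE B (Python) =====
-- # Single left-to-right scan: visit each delimiter (' ', '(', '[') in the padded
-- # lowercased string and test only the words that can follow it, instead of one
-- # full substring search per keyword.
--
-- _SPACE_WORDS = ('live ', 'live-', 'live_', 'remaster', 'acoustic', 'demo',
--                 'edit', 'karaoke', 'instrumental')
-- _BRACKET_WORDS = ('live', 'remaster', 'acoustic', 'demo', 'edit')
--
--
-- def is_unwanted_version(title, album=None):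
--     """Return True if the track looks like a live/remaster/demo/acoustic/etc. version we should avoid."""
--     def flagged(text):
--         if not text:
--             return False
--         s = f" {text.lower()} "
--         for i, c in enumerate(s):
--             if c == ' ':
--                 words = _SPACE_WORDS
--             elif c == '(' or c == '[':
--                 words = _BRACKET_WORDS
--             else:
--                 continue
--             if any(s.startswith(w, i + 1) for w in words):
--                 return True
--         return False
--
--     return flagged(title) or flagged(album)
-- ===== Notes on version B (the rewrite author's own statement) =====
-- stated objective: alternative
-- what changed: Replaces A's per-keyword substring search over the padded string with a single left-to-right scan that, at each delimiter character (space or opening bracket), tests only the words that can follow it, the redundant remastered keyword being absorbed by its remaster prefix.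
import Mathlib
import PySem

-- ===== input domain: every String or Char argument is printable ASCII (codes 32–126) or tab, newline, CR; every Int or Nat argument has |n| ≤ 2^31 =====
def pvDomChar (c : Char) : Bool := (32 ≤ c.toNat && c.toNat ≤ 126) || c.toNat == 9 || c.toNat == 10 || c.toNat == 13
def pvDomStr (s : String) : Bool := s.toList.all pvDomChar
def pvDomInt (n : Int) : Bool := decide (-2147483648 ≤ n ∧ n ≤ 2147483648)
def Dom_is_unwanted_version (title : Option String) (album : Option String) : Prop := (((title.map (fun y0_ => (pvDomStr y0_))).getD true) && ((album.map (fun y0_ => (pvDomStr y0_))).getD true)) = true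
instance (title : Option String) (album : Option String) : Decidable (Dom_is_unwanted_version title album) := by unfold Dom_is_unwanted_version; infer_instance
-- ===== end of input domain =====

-- B replaces the per-keyword substring search with one left-to-right scan over the padded
-- string that tests, at each delimiter character, only the words that can follow it (alternative decomposition).

-- ===== PORT A =====
def pvKeywords : List (List Char) :=
  [" live ".toList, " live-".toList, " live_".toList, "(live".toList, "[live".toList,
   " remaster".toList, "(remaster".toList, "[remaster".toList, " remastered".toList,
   " acoustic".toList, "(acoustic".toList, "[acoustic".toList,
   " demo".toList, "(demo".toList, "[demo".toList,
   " edit".toList, "(edit".toList, "[edit".toList,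
   " karaoke".toList, " instrumental".toList]

def hasAnyKeyword (text : Option String) : Bool :=
  match text with
  | none => false
  | some s =>
    if s.toList = [] then false
    else
      let t := PySem.Chars.lower s.toList
      let tSpaced := ' ' :: t ++ [' ']        -- f" {t} "
      pvKeywords.any (fun k => PySem.Chars.isIn k tSpaced)

def is_unwanted_version (title : Option String) (album : Option String) : Bool :=
  hasAnyKeyword title || hasAnyKeyword album

-- ===== PORT B =====
def pvSpaceWords : List (List Char) :=
  ["live ".toList, "live-".toList, "live_".toList, "remaster".toList, "acoustic".toList,
   "demo".toList, "edit".toList, "karaoke".toList, "instrumental".toList]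

def pvBracketWords : List (List Char) :=
  ["live".toList, "remaster".toList, "acoustic".toList, "demo".toList, "edit".toList]

-- the loop body at one position: look at the character, test only the words that may follow it
def pvMatchAt : List Char → Bool
  | [] => false
  | c :: rest =>
    if c = ' ' then pvSpaceWords.any (fun w => PySem.Chars.startswith rest w)
    else if c = '(' ∨ c = '[' then pvBracketWords.any (fun w => PySem.Chars.startswith rest w)
    else false

def pvScan : List Char → Bool
  | [] => false
  | c :: rest => pvMatchAt (c :: rest) || pvScan rest

def pvFlagged (text : Option String) : Bool :=
  match text with
  | none => false
  | some s =>
    if s.toList = [] then false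
    else pvScan (' ' :: PySem.Chars.lower s.toList ++ [' '])

def is_unwanted_version_alt (title : Option String) (album : Option String) : Bool :=
  pvFlagged title || pvFlagged album

-- ===== PRECONDITION & SPEC =====
def Spec_is_unwanted_version (title : Option String) (album : Option String) (out : Bool) : Prop := out = is_unwanted_version_alt title album
instance (title : Option String) (album : Option String) (out : Bool) : Decidable (Spec_is_unwanted_version title album out) := by unfold Spec_is_unwanted_version; infer_instance

-- ===== CLAIM (what is proved, stated in full; the proofs are below) =====
def Claim_equal_is_unwanted_version : Prop := ∀ (title : Option String) (album : Option String), Dom_is_unwanted_version title album → Spec_is_unwanted_version title album (is_unwanted_version title album)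

-- ===== LEMMAS AND PROOFS =====

-- at one position, B's delimiter-directed test accepts exactly when some full keyword starts there
lemma pvMatchAt_iff (t : List Char) :
    pvMatchAt t = true ↔ ∃ k ∈ pvKeywords, k <+: t := by
  cases t with
  | nil => decide
  | cons c r =>
    -- ' remastered' is absent from pvSpaceWords: a match of it is already a match of ' remaster'
    have hrem : "remastered".toList <+: r → "remaster".toList <+: r := by
      intro h; exact List.IsPrefix.trans (by decide) h
    rcases eq_or_ne c ' ' with h | h1
    · subst h
      simp [pvMatchAt, pvSpaceWords, pvKeywords,
            PySem.Chars.startswith_iff, List.cons_prefix_cons]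
      tauto
    · rcases eq_or_ne c '(' with h | h2
      · subst h
        simp [pvMatchAt, pvBracketWords, pvKeywords,
              PySem.Chars.startswith_iff, List.cons_prefix_cons]
      · rcases eq_or_ne c '[' with h | h3
        · subst h
          simp [pvMatchAt, pvBracketWords, pvKeywords,
                PySem.Chars.startswith_iff, List.cons_prefix_cons]
        · simp [pvMatchAt, h1, h2, h3, pvKeywords, List.cons_prefix_cons,
                Ne.symm h1, Ne.symm h2, Ne.symm h3]

-- the scan accepts exactly when some position matches
lemma pvScan_iff (s : List Char) :
    pvScan s = true ↔ ∃ j, pvMatchAt (s.drop j) = true := by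
  induction s with
  | nil => simp [pvScan, show pvMatchAt [] = false from rfl]
  | cons c r ih =>
    simp only [pvScan, Bool.or_eq_true, ih]
    constructor
    · rintro (h | ⟨j, hj⟩)
      · exact ⟨0, h⟩
      · exact ⟨j + 1, by simpa using hj⟩
    · rintro ⟨j, hj⟩
      cases j with
      | zero => exact Or.inl hj
      | succ j => exact Or.inr ⟨j, by simpa using hj⟩

-- the two helpers agree on every list
lemma pvAny_eq_scan (s : List Char) :
    pvKeywords.any (fun k => PySem.Chars.isIn k s) = pvScan s := by
  rw [Bool.eq_iff_iff, pvScan_iff]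
  simp only [List.any_eq_true]
  constructor
  · rintro ⟨k, hk, hin⟩
    obtain ⟨j, hj⟩ := (PySem.Chars.exists_prefix_drop_iff_isIn ..).mpr hin
    exact ⟨j, (pvMatchAt_iff _).mpr ⟨k, hk, hj⟩⟩
  · rintro ⟨j, hj⟩
    obtain ⟨k, hk, hp⟩ := (pvMatchAt_iff _).mp hj
    exact ⟨k, hk, (PySem.Chars.exists_prefix_drop_iff_isIn ..).mp ⟨j, hp⟩⟩

lemma pvHelpers_eq (text : Option String) : hasAnyKeyword text = pvFlagged text := by
  cases text with
  | none => rfl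
  | some s =>
    simp only [hasAnyKeyword, pvFlagged]
    split
    · rfl
    · exact pvAny_eq_scan _

-- ===== VERDICT (by name: the statement is the Claim_ definition above) =====
theorem is_unwanted_version_spec : Claim_equal_is_unwanted_version := by
  intro title album _
  unfold Spec_is_unwanted_version is_unwanted_version is_unwanted_version_alt
  rw [pvHelpers_eq, pvHelpers_eq]
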